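-- pv_equiv track=rewrite | github.com/pypi-data/pypi-mirror-364 | packages/equitrcoder/equitrcoder-1.0.0-py3-none-any.whl/equitrcoder/tools/builtin/audit.py | parse_audit_findings
-- ===== SOURCE A (Python) =====
-- from typing import Dict, List, Optional, Any
--
-- def parse_audit_findings(audit_result: str) -> List[Dict[str, Any]]:
--     """Parse audit result to extract specific issues for todo creation."""
--     findings = []
--
--     # Look for common audit failure patterns
--     lines = audit_result.split('\n')
--     current_issue = None
--
--     for line in lines:
--         line = line.strip()
--         if not line:
--             continue
--
--         # Detect issue indicators
--         if any(indicator in line.lower() for indicator in [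
--             'missing', 'error', 'failed', 'incomplete', 'todo:', 'fix:', 'issue:'
--         ]):
--             if current_issue:
--                 findings.append(current_issue)
--
--             current_issue = {
--                 'title': line[:100],  # Truncate long titles
--                 'description': line,
--                 'priority': 'high' if any(urgent in line.lower() for urgent in ['critical', 'error', 'failed']) else 'medium'
--             }
--         elif current_issue and line:
--             # Add additional context to current issue
--             current_issue['description'] += f"\n{line}"
--
--     # Add the last issue if exists
--     if current_issue:
--         findings.append(current_issue)
--
--     # If no specific issues found, create a general issue
--     if not findings:
--         findings.append({
--             'title': 'General audit failure - requires investigation',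
--             'description': f"Audit failed but no specific issues were identified.\n\nFull audit result:\n{audit_result}",
--             'priority': 'medium'
--         })
--
--     return findings
-- ===== SOURCE B (Python) =====
-- from typing import Any, Dict, List
--
-- _INDICATORS = ('missing', 'error', 'failed', 'incomplete', 'todo:', 'fix:', 'issue:')
-- _URGENT = ('critical', 'error', 'failed')
--
--
-- def _is_indicator(line: str) -> bool:
--     low = line.lower()
--     return any(k in low for k in _INDICATORS)
--
--
-- def parse_audit_findings(audit_result: str) -> List[Dict[str, Any]]:
--     """Parse audit result to extract specific issues for todo creation."""
--     # Phase 1: stripped, non-empty lines.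
--     lines = [s for s in (raw.strip() for raw in audit_result.split('\n')) if s]
--
--     # Phase 2: group lines; each indicator line starts a group, lines before
--     # the first indicator are discarded.
--     groups: List[List[str]] = []
--     i = 0
--     while i < len(lines) and not _is_indicator(lines[i]):
--         i += 1
--     while i < len(lines):
--         j = i + 1
--         while j < len(lines) and not _is_indicator(lines[j]):
--             j += 1
--         groups.append(lines[i:j])
--         i = j
--
--     # Phase 3: one finding per group.
--     findings = [{
--         'title': g[0][:100],
--         'description': '\n'.join(g),
--         'priority': 'high' if any(u in g[0].lower() for u in _URGENT) else 'medium',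
--     } for g in groups]
--
--     if not findings:
--         findings = [{
--             'title': 'General audit failure - requires investigation',
--             'description': f"Audit failed but no specific issues were identified.\n\nFull audit result:\n{audit_result}",
--             'priority': 'medium',
--         }]
--     return findings
-- ===== Notes on version B (the rewrite author's own statement) =====
-- stated objective: alternative
-- what changed: B replaces A's single stateful scan (carrying a mutable current-issue dict and appending on each new indicator) by a three-phase pipeline: clean the lines, group them at indicator lines, then map each group to a finding dict.
import Mathlib
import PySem

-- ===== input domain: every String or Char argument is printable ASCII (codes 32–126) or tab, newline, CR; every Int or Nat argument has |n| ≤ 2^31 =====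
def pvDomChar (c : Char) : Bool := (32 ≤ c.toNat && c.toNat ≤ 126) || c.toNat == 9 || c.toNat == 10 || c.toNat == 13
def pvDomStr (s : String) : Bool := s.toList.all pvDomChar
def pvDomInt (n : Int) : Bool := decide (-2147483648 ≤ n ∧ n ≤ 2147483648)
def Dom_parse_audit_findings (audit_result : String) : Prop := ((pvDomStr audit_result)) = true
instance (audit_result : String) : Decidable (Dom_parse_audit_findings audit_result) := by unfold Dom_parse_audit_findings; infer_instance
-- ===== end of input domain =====

-- B re-implements the parser as three phases (clean lines, group at indicator lines, map groups
-- to findings) instead of A's single stateful scan; objective: alternative decomposition, same cost.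

def pvIndicators : List String := ["missing", "error", "failed", "incomplete", "todo:", "fix:", "issue:"]
def pvUrgent : List String := ["critical", "error", "failed"]

-- ===== PORT A =====
-- loop body after the 'if not line: continue' guard (the dict literal is an assoc list in key order;
-- 'current_issue["description"] += …' updates the "description" entry in place — exact, keys distinct)
def pvInnerA (st : List (List (String × String)) × Option (List (String × String))) (line : String) :
    List (List (String × String)) × Option (List (String × String)) :=
  if pvIndicators.any (fun ind => PySem.Str.isIn ind (PySem.Str.lower line)) then
    let findings := match st.2 with | some cur => st.1 ++ [cur] | none => st.1
    (findings,
      some [("title", PySem.Str.slice line none (some 100)),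
            ("description", line),
            ("priority", if pvUrgent.any (fun u => PySem.Str.isIn u (PySem.Str.lower line)) then "high" else "medium")])
  else
    match st.2 with
    | some cur =>
        if line ≠ "" then
          (st.1, some (cur.map (fun pr => if pr.1 == "description" then (pr.1, pr.2 ++ "\n" ++ line) else pr)))
        else st
    | none => st

def pvStepA (st : List (List (String × String)) × Option (List (String × String))) (raw : String) :
    List (List (String × String)) × Option (List (String × String)) :=
  let line := PySem.Str.strip raw
  if line = "" then st else pvInnerA st line

def parse_audit_findings (audit_result : String) : List (List (String × String)) :=
  let lines := (PySem.Str.split? audit_result "\n").getD []   -- sep ≠ "", so split? is always some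
  let st := lines.foldl pvStepA ([], none)
  let findings := match st.2 with | some cur => st.1 ++ [cur] | none => st.1
  if findings = [] then
    [[("title", "General audit failure - requires investigation"),
      ("description", "Audit failed but no specific issues were identified.\n\nFull audit result:\n" ++ audit_result),
      ("priority", "medium")]]
  else findings

-- ===== PORT B =====
def pvIsInd (line : String) : Bool :=
  let low := PySem.Str.lower line
  pvIndicators.any (fun k => PySem.Str.isIn k low)

-- phase 2 step: an indicator line starts a new group, other lines extend the last group (if any)
def pvStepB (groups : List (List String)) (line : String) : List (List String) :=
  if pvIsInd line then groups ++ [[line]]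
  else if groups.isEmpty then groups
  else groups.dropLast ++ [groups.getLastD [] ++ [line]]

-- phase 3: one finding per group (groups are nonempty; g.headD "" is Python's g[0])
def pvMkFinding (g : List String) : List (String × String) :=
  [("title", PySem.Str.slice (g.headD "") none (some 100)),
   ("description", PySem.Str.join "\n" g),
   ("priority", if pvUrgent.any (fun u => PySem.Str.isIn u (PySem.Str.lower (g.headD ""))) then "high" else "medium")]

def parse_audit_findings_alt (audit_result : String) : List (List (String × String)) :=
  let lines := (((PySem.Str.split? audit_result "\n").getD []).map PySem.Str.strip).filter
      (fun s => decide (s ≠ ""))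
  let groups := lines.foldl pvStepB []
  let findings := groups.map pvMkFinding
  if findings = [] then
    [[("title", "General audit failure - requires investigation"),
      ("description", "Audit failed but no specific issues were identified.\n\nFull audit result:\n" ++ audit_result),
      ("priority", "medium")]]
  else findings

-- ===== PRECONDITION & SPEC =====
def Spec_parse_audit_findings (audit_result : String) (out : List (List (String × String))) : Prop := out = parse_audit_findings_alt audit_result
instance (audit_result : String) (out : List (List (String × String))) : Decidable (Spec_parse_audit_findings audit_result out) := by unfold Spec_parse_audit_findings; infer_instance

-- ===== CLAIM (what is proved, stated in full; the proofs are below) =====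
def Claim_equal_parse_audit_findings : Prop := ∀ (audit_result : String), Dom_parse_audit_findings audit_result → Spec_parse_audit_findings audit_result (parse_audit_findings audit_result)

-- ===== LEMMAS AND PROOFS =====

-- B's state, read as A's state: the finished groups as findings, the open group as the current issue
def pvPhi (groups : List (List String)) :
    List (List (String × String)) × Option (List (String × String)) :=
  match groups.getLast? with
  | none => ([], none)
  | some g => (groups.dropLast.map pvMkFinding, some (pvMkFinding g))

theorem pvPhi_concat (gs : List (List String)) (g : List String) :
    pvPhi (gs ++ [g]) = (gs.map pvMkFinding, some (pvMkFinding g)) := by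
  simp [pvPhi]

theorem pvJoin_concat (sep : List Char) (g : List (List Char)) (x : List Char) (hg : g ≠ []) :
    PySem.Chars.join sep (g ++ [x]) = PySem.Chars.join sep g ++ sep ++ x := by
  induction g with
  | nil => exact absurd rfl hg
  | cons a t ih =>
      cases t with
      | nil => simp [PySem.Chars.join_cons_cons, PySem.Chars.join_singleton]
      | cons b t' =>
          simp only [List.cons_append] at ih ⊢
          rw [PySem.Chars.join_cons_cons, PySem.Chars.join_cons_cons, ih (by simp)]
          simp [List.append_assoc]

theorem pvStrJoin_singleton (x : String) : PySem.Str.join "\n" [x] = x := by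
  apply String.toList_inj.mp
  simp [PySem.Str.toList_join, PySem.Chars.join_singleton]

theorem pvStrJoin_concat (g : List String) (x : String) (hg : g ≠ []) :
    PySem.Str.join "\n" (g ++ [x]) = PySem.Str.join "\n" g ++ "\n" ++ x := by
  apply String.toList_inj.mp
  simp only [PySem.Str.toList_join, List.map_append, List.map_cons, List.map_nil,
    String.toList_append]
  rw [pvJoin_concat _ _ _ (by simpa using hg)]

theorem pvMk_singleton (x : String) :
    pvMkFinding [x] =
      [("title", PySem.Str.slice x none (some 100)),
       ("description", x),
       ("priority", if pvUrgent.any (fun u => PySem.Str.isIn u (PySem.Str.lower x)) then "high" else "medium")] := by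
  simp [pvMkFinding, pvStrJoin_singleton]

theorem pvMk_extend (g : List String) (x : String) (hg : g ≠ []) :
    (pvMkFinding g).map (fun pr => if pr.1 == "description" then (pr.1, pr.2 ++ "\n" ++ x) else pr)
      = pvMkFinding (g ++ [x]) := by
  cases g with
  | nil => exact absurd rfl hg
  | cons h t =>
      simp only [pvMkFinding, List.headD_cons, List.cons_append, List.map_cons]
      rw [show h :: (t ++ [x]) = (h :: t) ++ [x] from rfl, pvStrJoin_concat (h :: t) x (by simp)]
      simp

theorem pvStepB_ne (gs : List (List String)) (x : String) (h : ∀ g ∈ gs, g ≠ []) :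
    ∀ g ∈ pvStepB gs x, g ≠ [] := by
  intro g hgmem
  unfold pvStepB at hgmem
  split at hgmem
  · rcases List.mem_append.mp hgmem with hl | hl
    · exact h g hl
    · simp at hl; simp [hl]
  · split at hgmem
    · exact h g hgmem
    · rcases List.mem_append.mp hgmem with hl | hl
      · exact h g (List.mem_of_mem_dropLast hl)
      · simp at hl; simp [hl]

theorem pvStep_comm (gs : List (List String)) (x : String)
    (hgs : ∀ g ∈ gs, g ≠ []) (hx : x ≠ "") :
    pvInnerA (pvPhi gs) x = pvPhi (pvStepB gs x) := by
  have hcond : (pvIndicators.any fun ind => PySem.Str.isIn ind (PySem.Str.lower x)) = pvIsInd x := rfl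
  rcases List.eq_nil_or_concat gs with rfl | ⟨gs', g, rfl⟩
  · unfold pvInnerA pvStepB
    rw [hcond]
    cases hi : pvIsInd x with
    | true => simp [pvPhi, pvMk_singleton]
    | false => simp [pvPhi]
  · simp only [List.concat_eq_append] at hgs ⊢
    have hg : g ≠ [] := hgs g (by simp)
    rw [pvPhi_concat]
    unfold pvInnerA pvStepB
    rw [hcond]
    cases hi : pvIsInd x with
    | true =>
        simp only [if_true]
        rw [pvPhi_concat (gs' ++ [g]) [x]]
        simp [pvMk_singleton]
    | false =>
        simp only [Bool.false_eq_true, if_false, hx, ne_eq, not_false_iff, if_true]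
        have hiE : (gs' ++ [g]).isEmpty = false := by simp
        rw [hiE]
        simp only [Bool.false_eq_true, if_false, List.dropLast_concat, List.getLastD_concat]
        rw [pvPhi_concat gs' (g ++ [x]), pvMk_extend g x hg]

theorem pvFold_comm (ls : List String) :
    ∀ gs, (∀ g ∈ gs, g ≠ []) → (∀ x ∈ ls, x ≠ "") →
      ls.foldl pvInnerA (pvPhi gs) = pvPhi (ls.foldl pvStepB gs) := by
  induction ls with
  | nil => intro gs _ _; rfl
  | cons x t ih =>
      intro gs hgs hls
      simp only [List.foldl_cons]
      rw [pvStep_comm gs x hgs (hls x (by simp)),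
        ih (pvStepB gs x) (pvStepB_ne gs x hgs) (fun y hy => hls y (by simp [hy]))]

theorem pvFinish_phi (groups : List (List String)) :
    (match (pvPhi groups).2 with
     | some cur => (pvPhi groups).1 ++ [cur]
     | none => (pvPhi groups).1) = groups.map pvMkFinding := by
  rcases List.eq_nil_or_concat groups with rfl | ⟨gs', g, rfl⟩
  · rfl
  · simp only [List.concat_eq_append]
    rw [pvPhi_concat]; simp

-- A's raw-line loop equals the inner loop over the stripped, non-empty lines
theorem pvStepA_filter (raw : List String) :
    raw.foldl pvStepA ([], none)
      = ((raw.map PySem.Str.strip).filter (fun s => decide (s ≠ ""))).foldl pvInnerA ([], none) := by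
  rw [← PySem.List.foldl_ite_eq_foldl_filter (p := fun s => s ≠ "") pvInnerA, List.foldl_map]
  apply PySem.List.foldl_congr_mem
  intro acc x _
  by_cases h : PySem.Str.strip x = "" <;> simp [pvStepA, h]

-- ===== VERDICT (by name: the statement is the Claim_ definition above) =====
theorem parse_audit_findings_spec : Claim_equal_parse_audit_findings := by
  intro audit_result _
  unfold Spec_parse_audit_findings parse_audit_findings parse_audit_findings_alt
  simp only []
  rw [pvStepA_filter]
  rw [show (([], none) : List (List (String × String)) × Option (List (String × String))) = pvPhi [] from rfl]
  rw [pvFold_comm _ [] (by simp) (by intro x hx; simpa using (List.of_mem_filter hx))]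
  rw [pvFinish_phi]
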